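-- pv_equiv track=rewrite | github.com/cookie-god/algorithm | programmers/level2/[PCCP 기출문제] 2번 퍼즐 게임 챌린지.py | solution
-- ===== SOURCE A (Python) =====
-- def solution(diffs, times, limit):
--     answer = 0
--     start = 1  # 레벨 1부터
--     end = 10 ** 15  # limit의 크기까지
--
--     def caculate(level):
--         sum = 0  # 소요시간 계산
--         for i in range(len(diffs)):
--             if diffs[i] <= level:  # 퍼즐 틀리지 않는 경우
--                 sum += times[i]  # 퍼즐 해결한 경우
--             else:
--                 tc = times[i]  # 현재 시간
--                 tp = 0  # 이전 시간
--                 if i - 1 >= 0:  # 첫번째 원소가 아닌 경우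
--                     tp = times[i - 1]  # 이전 시간 셋팅
--                 sum += (tc + tp) * (diffs[i] - level) + tc  # 소요시간 셋팅
--         return sum
--
--     while True:
--         if start >= end:  # 탐색 종료 조건
--             break
--
--         mid = (end + start) // 2  # 중간값 계산
--         sum = caculate(mid)  # 중간값을 레벨로 체크
--
--         if sum > limit:  # 합계가 더 크다면 렙이 더 올라가야함
--             start = mid + 1
--         else:  # 합계가 더 작다면 렙을 낮춰야함
--             end = mid
--
--     answer = start  # 가장 최솟값이 렙
--     return answer
-- ===== SOURCE B (Python) =====
-- def solution(diffs, times, limit):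
--     # Sort by difficulty + suffix prefix-sums: each cost evaluation is O(1)
--     # (after an O(log n) index search) instead of a full O(n) rescan.
--     n = len(diffs)
--     base = sum(times[:n])
--     pairs = [(diffs[i], times[i] + (times[i - 1] if i > 0 else 0)) for i in range(n)]
--     pairs.sort(key=lambda p: p[0])
--     ds = [p[0] for p in pairs]
--     # suf[k] = (sum of c*d, sum of c) over pairs[k:]
--     suf = [(0, 0)] * (n + 1)
--     for k in range(n - 1, -1, -1):
--         d, c = pairs[k]
--         suf[k] = (c * d + suf[k + 1][0], c + suf[k + 1][1])
--
--     def cost(level):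
--         lo, hi = 0, n          # hand-rolled bisect_right over ds
--         while lo < hi:
--             m = (lo + hi) // 2
--             if ds[m] <= level:
--                 lo = m + 1
--             else:
--                 hi = m
--         scd, sc = suf[lo]
--         return base + scd - level * sc
--
--     start, end = 1, 10 ** 15
--     while start < end:
--         mid = (start + end) // 2
--         if cost(mid) > limit:
--             start = mid + 1
--         else:
--             end = mid
--     return start
-- ===== Notes on version B (the rewrite author's own statement) =====
-- stated objective: faster
-- what changed: B sorts the puzzles by difficulty once and precomputes suffix sums of the retry coefficients, so each binary-search probe evaluates the total time with an O(log n) index search plus O(1) arithmetic instead of A's full O(n) rescan.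
import Mathlib
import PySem

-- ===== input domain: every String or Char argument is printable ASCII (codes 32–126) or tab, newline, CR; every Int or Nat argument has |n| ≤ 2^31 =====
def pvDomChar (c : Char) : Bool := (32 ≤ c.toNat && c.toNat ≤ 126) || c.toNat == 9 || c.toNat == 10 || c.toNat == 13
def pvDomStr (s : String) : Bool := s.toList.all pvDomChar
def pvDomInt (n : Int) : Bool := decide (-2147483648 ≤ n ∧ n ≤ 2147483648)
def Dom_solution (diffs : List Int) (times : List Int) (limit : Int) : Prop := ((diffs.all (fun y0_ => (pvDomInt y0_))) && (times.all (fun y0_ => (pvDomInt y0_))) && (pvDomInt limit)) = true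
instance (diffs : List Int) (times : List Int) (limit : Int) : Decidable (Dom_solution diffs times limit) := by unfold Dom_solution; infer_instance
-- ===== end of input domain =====

-- B replaces A's O(n) rescan of all puzzles at every binary-search probe by a
-- one-time sort by difficulty plus suffix sums, evaluated per probe via an
-- O(log n) index search (objective: faster).

-- ===== PORT A =====

-- A's inner helper `caculate(level)`: a full scan over range(len(diffs)).
def caculateA (diffs : List Int) (times : List Int) (level : Int) : Int :=
  (PySem.List.pyRange 0 (diffs.length : Int) 1).foldl (fun s i =>
    if PySem.List.pyGetD diffs i 0 ≤ level then
      s + PySem.List.pyGetD times i 0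
    else
      let tc := PySem.List.pyGetD times i 0
      let tp := if i - 1 ≥ 0 then PySem.List.pyGetD times (i - 1) 0 else 0
      s + ((tc + tp) * (PySem.List.pyGetD diffs i 0 - level) + tc)) 0

-- A's `while True` binary search on the level.
def loopA (diffs : List Int) (times : List Int) (limit : Int) (start e : Int) : Int :=
  if start ≥ e then start
  else
    let mid := PySem.Int.floordiv (e + start) 2
    if caculateA diffs times mid > limit then loopA diffs times limit (mid + 1) e
    else loopA diffs times limit start mid
termination_by (e - start).toNat
decreasing_by
  · have h := PySem.Int.floordiv_two_mid_bounds (lo := start) (hi := e) (by omega)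
    rw [Int.add_comm] at h; omega
  · have h := PySem.Int.floordiv_two_mid_bounds (lo := start) (hi := e) (by omega)
    have h2 : PySem.Int.floordiv (e + start) 2 < e := by
      rw [PySem.Int.floordiv_lt_iff_lt_mul (by omega)]; omega
    rw [Int.add_comm] at h; omega

def solution (diffs : List Int) (times : List Int) (limit : Int) : Int :=
  loopA diffs times limit 1 1000000000000000

-- ===== PORT B =====

-- pairs = [(diffs[i], times[i] + (times[i-1] if i > 0 else 0)) for i in range(n)]
def pairsB (diffs : List Int) (times : List Int) : List (Int × Int) :=
  (PySem.List.pyRange 0 (diffs.length : Int) 1).map (fun i =>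
    (PySem.List.pyGetD diffs i 0,
     PySem.List.pyGetD times i 0 + if 0 < i then PySem.List.pyGetD times (i - 1) 0 else 0))

-- suf[k] = (sum of c*d, sum of c) over pairs[k:]; Source B fills the array from the
-- right (k = n-1 .. 0), which is exactly this right-to-left structural recursion.
def sufB : List (Int × Int) → List (Int × Int)
  | [] => [(0, 0)]
  | (d, c) :: r =>
    let s := sufB r
    (c * d + (s.headD (0, 0)).1, c + (s.headD (0, 0)).2) :: s

-- Source B's hand-rolled bisect_right over ds (lo, hi stay ≥ 0, so Nat is exact here;
-- (lo+hi)//2 on nonnegative ints is Nat division).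
def bsearchB (ds : List Int) (level : Int) (lo hi : Nat) : Nat :=
  if lo < hi then
    let m := (lo + hi) / 2
    if ds.getD m 0 ≤ level then bsearchB ds level (m + 1) hi
    else bsearchB ds level lo m
  else lo
termination_by hi - lo
decreasing_by all_goals omega

def costB (base : Int) (ds : List Int) (suf : List (Int × Int)) (level : Int) : Int :=
  let k := bsearchB ds level 0 ds.length
  let p := suf.getD k (0, 0)
  base + p.1 - level * p.2

def loopB (base : Int) (ds : List Int) (suf : List (Int × Int)) (limit : Int) (start e : Int) : Int :=
  if start < e then
    let mid := PySem.Int.floordiv (start + e) 2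
    if costB base ds suf mid > limit then loopB base ds suf limit (mid + 1) e
    else loopB base ds suf limit start mid
  else start
termination_by (e - start).toNat
decreasing_by
  · have h := PySem.Int.floordiv_two_mid_bounds (lo := start) (hi := e) (by omega)
    omega
  · have h2 : PySem.Int.floordiv (start + e) 2 < e := by
      rw [PySem.Int.floordiv_lt_iff_lt_mul (by omega)]; omega
    omega

def solution_alt (diffs : List Int) (times : List Int) (limit : Int) : Int :=
  let n := diffs.length
  let base := (PySem.List.slice times none (some (n : Int))).sum
  let pairs := PySem.List.sorted (pairsB diffs times) (fun p => p.1) false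
  let ds := pairs.map (fun p => p.1)
  let suf := sufB pairs
  loopB base ds suf limit 1 1000000000000000

-- ===== PRECONDITION & SPEC =====

-- Pre_ excludes exactly the inputs where A raises IndexError: times[i] (or
-- times[i-1]) with i up to len(diffs)-1 requires len(diffs) ≤ len(times).
def Pre_solution (diffs : List Int) (times : List Int) (limit : Int) : Prop :=
  diffs.length ≤ times.length
instance (diffs : List Int) (times : List Int) (limit : Int) : Decidable (Pre_solution diffs times limit) := by unfold Pre_solution; infer_instance

def pvWitness_solution : List Int × List Int × Int := ([2, 5, 3], [10, 20, 30], 100)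

def Spec_solution (diffs : List Int) (times : List Int) (limit : Int) (out : Int) : Prop := out = solution_alt diffs times limit
instance (diffs : List Int) (times : List Int) (limit : Int) (out : Int) : Decidable (Spec_solution diffs times limit out) := by unfold Spec_solution; infer_instance

-- ===== CLAIM (what is proved, stated in full; the proofs are below) =====
def Claim_equal_solution : Prop := ∀ (diffs : List Int) (times : List Int) (limit : Int), Dom_solution diffs times limit → Pre_solution diffs times limit → Spec_solution diffs times limit (solution diffs times limit)

-- ===== LEMMAS AND PROOFS =====

-- per-pair contribution of an unsolved (d > level) puzzle
def exP (level : Int) (p : Int × Int) : Int :=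
  if level < p.1 then p.2 * (p.1 - level) else 0

-- A's scan = sum of times[:n] + sum of the unsolved extras, pair by pair.
theorem map_range_getD_take (xs : List Int) (n : Nat) (h : n ≤ xs.length) :
    ((List.range n).map (fun k => xs.getD k 0)) = xs.take n := by
  apply List.ext_getElem (by simp [h])
  intro i h1 h2
  simp only [List.length_map, List.length_range] at h1
  have hix : i < xs.length := by omega
  simp [List.getElem_take, List.getElem?_eq_getElem hix]

theorem caculateA_eq (diffs times : List Int) (level : Int)
    (h : diffs.length ≤ times.length) :
    caculateA diffs times level
      = (times.take diffs.length).sum + ((pairsB diffs times).map (exP level)).sum := by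
  unfold caculateA
  rw [show (fun (s i : Int) =>
      if PySem.List.pyGetD diffs i 0 ≤ level then
        s + PySem.List.pyGetD times i 0
      else
        let tc := PySem.List.pyGetD times i 0
        let tp := if i - 1 ≥ 0 then PySem.List.pyGetD times (i - 1) 0 else 0
        s + ((tc + tp) * (PySem.List.pyGetD diffs i 0 - level) + tc))
    = (fun s i => s + (if PySem.List.pyGetD diffs i 0 ≤ level then
        PySem.List.pyGetD times i 0
      else
        ((PySem.List.pyGetD times i 0 + (if i - 1 ≥ 0 then PySem.List.pyGetD times (i - 1) 0 else 0))
          * (PySem.List.pyGetD diffs i 0 - level) + PySem.List.pyGetD times i 0))) from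
    funext fun s => funext fun i => by split <;> rfl]
  rw [PySem.List.foldl_add]
  rw [List.map_congr_left (l := PySem.List.pyRange 0 (diffs.length : Int) 1)
    (g := fun i => PySem.List.pyGetD times i 0 + exP level
      (PySem.List.pyGetD diffs i 0,
       PySem.List.pyGetD times i 0 + if 0 < i then PySem.List.pyGetD times (i - 1) 0 else 0))
    (fun i hi => by
      have h0 : 0 ≤ i := ((PySem.List.mem_pyRange_one).mp hi).1
      by_cases hd : PySem.List.pyGetD diffs i 0 ≤ level
      · simp [exP, hd, not_lt.mpr hd]
      · have hcond : (i - 1 ≥ 0) = (0 < i) := by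
          apply propext; omega
        rw [if_neg hd]
        simp only [exP, if_pos (not_le.mp hd), hcond]
        ring)]
  rw [PySem.List.sum_map_add_int]
  have e1 : (List.map (fun i => PySem.List.pyGetD times i 0)
      (PySem.List.pyRange 0 (diffs.length : Int) 1)).sum = (times.take diffs.length).sum := by
    rw [PySem.List.pyRange_one]
    simp only [Int.sub_zero, Int.toNat_natCast, List.map_map]
    have hc : ((fun i => PySem.List.pyGetD times i 0) ∘ fun k : Nat => (0 : Int) + (k : Int))
        = fun k : Nat => times.getD k 0 := by
      funext k; simp [PySem.List.pyGetD_natCast]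
    rw [hc, map_range_getD_take times diffs.length h]
  have e2 : (List.map (fun i => exP level
      (PySem.List.pyGetD diffs i 0,
       PySem.List.pyGetD times i 0 + if 0 < i then PySem.List.pyGetD times (i - 1) 0 else 0))
      (PySem.List.pyRange 0 (diffs.length : Int) 1)).sum
      = ((pairsB diffs times).map (exP level)).sum := by
    rw [pairsB, List.map_map]
    rfl
  rw [e1, e2]
  omega

theorem headD_getD (l : List (Int × Int)) (d : Int × Int) : l.headD d = l.getD 0 d := by
  cases l <;> simp

-- suffix sums: (sufB S).getD k = sums over S.drop k (also for k out of range)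
theorem sufB_getD (S : List (Int × Int)) (k : Nat) :
    (sufB S).getD k (0, 0)
      = (((S.drop k).map (fun p => p.2 * p.1)).sum, ((S.drop k).map (fun p => p.2)).sum) := by
  induction S generalizing k with
  | nil => cases k <;> simp [sufB]
  | cons p r ih =>
    obtain ⟨d, c⟩ := p
    cases k with
    | zero =>
      show ((c * d + ((sufB r).headD (0,0)).1, c + ((sufB r).headD (0,0)).2) :: sufB r).getD 0 (0,0) = _
      rw [List.getD_cons_zero, headD_getD, ih 0]
      simp
    | succ k => simpa [sufB] using ih k

theorem getD_mono (ds : List Int) (hs : ds.Pairwise (· ≤ ·)) (i j : Nat)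
    (hij : i ≤ j) (hj : j < ds.length) : ds.getD i 0 ≤ ds.getD j 0 := by
  rcases Nat.eq_or_lt_of_le hij with rfl | hlt
  · exact le_refl _
  · rw [List.getD_eq_getElem ds 0 (by omega), List.getD_eq_getElem ds 0 hj]
    exact (List.pairwise_iff_getElem.mp hs) i j _ _ hlt

-- bisect_right spec on a sorted list
theorem bsearchB_spec (ds : List Int) (level : Int)
    (hs : ds.Pairwise (· ≤ ·)) :
    ∀ lo hi, lo ≤ hi → hi ≤ ds.length →
    (∀ j, j < lo → ds.getD j 0 ≤ level) →
    (∀ j, hi ≤ j → j < ds.length → level < ds.getD j 0) →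
    (bsearchB ds level lo hi ≤ ds.length
      ∧ (∀ j, j < bsearchB ds level lo hi → ds.getD j 0 ≤ level)
      ∧ (∀ j, bsearchB ds level lo hi ≤ j → j < ds.length → level < ds.getD j 0)) := by
  intro lo hi
  induction lo, hi using bsearchB.induct ds level with
  | case1 lo hi hlt m hm ih =>
    intro _ hhi hlo hhi2
    rw [bsearchB, if_pos hlt, if_pos hm]
    refine ih (by omega) hhi ?_ hhi2
    intro j hj
    exact le_trans (getD_mono ds hs j m (by omega) (by omega)) hm
  | case2 lo hi hlt m hm ih =>
    intro hle hhi hlo hhi2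
    rw [bsearchB, if_pos hlt, if_neg hm]
    refine ih (by omega) (by omega) hlo ?_
    intro j hj hjl
    exact lt_of_lt_of_le (lt_of_not_ge fun hc => hm hc)
      (getD_mono ds hs m j hj hjl)
  | case3 lo hi hnlt =>
    intro hle hhi hlo hhi2
    rw [bsearchB, if_neg hnlt]
    exact ⟨by omega, hlo, fun j hj hjl => hhi2 j (by omega) hjl⟩

theorem sum_exP_take (level : Int) (S : List (Int × Int)) (k : Nat)
    (h : ∀ j, (hj : j < S.length) → j < k → S[j].1 ≤ level) :
    ((S.take k).map (exP level)).sum = 0 := by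
  apply List.sum_eq_zero
  intro x hx
  rw [List.mem_map] at hx
  obtain ⟨p, hp, rfl⟩ := hx
  rw [List.mem_iff_getElem] at hp
  obtain ⟨i, hi, rfl⟩ := hp
  rw [List.getElem_take]
  have := h i (by simp at hi; omega) (by simp at hi; omega)
  simp [exP]; intro hc; omega

theorem sum_exP_drop (level : Int) (S : List (Int × Int)) (k : Nat)
    (h : ∀ j, (hj : j < S.length) → k ≤ j → level < S[j].1) :
    ((S.drop k).map (exP level)).sum
      = ((S.drop k).map (fun p => p.2 * p.1)).sum - level * ((S.drop k).map (fun p => p.2)).sum := by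
  have hcg : (S.drop k).map (exP level) = (S.drop k).map (fun p => p.2 * p.1 + (-level) * p.2) := by
    apply List.map_congr_left
    intro p hp
    rw [List.mem_iff_getElem] at hp
    obtain ⟨i, hi, rfl⟩ := hp
    rw [List.getElem_drop]
    have := h (k + i) (by simp at hi; omega) (by omega)
    simp only [exP, if_pos this]; ring
  rw [hcg, PySem.List.sum_map_add_int, PySem.List.sum_map_const_mul_int]
  ring

-- the fast evaluation agrees with the sum of extras on a list sorted by fst
theorem costB_eq (base : Int) (S : List (Int × Int)) (level : Int)
    (hs : S.Pairwise (fun a b => a.1 ≤ b.1)) :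
    costB base (S.map (fun p => p.1)) (sufB S) level
      = base + (S.map (exP level)).sum := by
  have hds : (S.map (fun p => p.1)).Pairwise (· ≤ ·) := by
    rw [List.pairwise_map]; exact hs
  obtain ⟨hk, h1, h2⟩ := bsearchB_spec (S.map (fun p => p.1)) level hds 0
    (S.map (fun p => p.1)).length (by omega) (by omega)
    (by omega) (by intro j hj hjl; omega)
  set k := bsearchB (S.map (fun p => p.1)) level 0 (S.map (fun p => p.1)).length with hkdef
  have hg : ∀ j, (hj : j < S.length) → (S.map (fun p => p.1)).getD j 0 = S[j].1 := by
    intro j hj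
    rw [List.getD_eq_getElem _ 0 (by simpa using hj), List.getElem_map]
  have hsum : (S.map (exP level)).sum
      = ((S.drop k).map (fun p => p.2 * p.1)).sum - level * ((S.drop k).map (fun p => p.2)).sum := by
    conv_lhs => rw [← List.take_append_drop k S]
    rw [List.map_append, List.sum_append]
    rw [sum_exP_take level S k (fun j hj hjk => by rw [← hg j hj]; exact h1 j hjk)]
    rw [sum_exP_drop level S k (fun j hj hjk => by rw [← hg j hj]; exact h2 j hjk (by simpa using hj))]
    ring
  show base + ((sufB S).getD k (0,0)).1 - level * ((sufB S).getD k (0,0)).2 = _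
  rw [sufB_getD, hsum]
  ring

-- the two cost evaluations agree
theorem cost_agree (diffs times : List Int) (level : Int)
    (h : diffs.length ≤ times.length) :
    caculateA diffs times level
      = costB ((PySem.List.slice times none (some (diffs.length : Int))).sum)
          ((PySem.List.sorted (pairsB diffs times) (fun p => p.1) false).map (fun p => p.1))
          (sufB (PySem.List.sorted (pairsB diffs times) (fun p => p.1) false)) level := by
  rw [costB_eq _ _ _ (PySem.List.sorted_pairwise (pairsB diffs times) (fun p => p.1))]
  rw [caculateA_eq diffs times level h]
  congr 1
  · exact (PySem.List.slice_to_natCast times diffs.length).symm ▸ rfl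
  · exact (((PySem.List.sorted_perm (pairsB diffs times) (fun p => p.1) false).map
      (exP level)).sum_eq).symm

-- the two identical binary-search drivers agree once the costs agree
theorem loop_agree (diffs times : List Int) (base : Int) (ds : List Int)
    (suf : List (Int × Int)) (limit : Int)
    (hc : ∀ level, caculateA diffs times level = costB base ds suf level) :
    ∀ s e, loopA diffs times limit s e = loopB base ds suf limit s e := by
  intro s e
  induction s, e using loopA.induct diffs times limit with
  | case1 s e hge =>
    rw [loopA, if_pos hge, loopB, if_neg (by omega)]
  | case2 s e hlt mid hcond ih =>
    rw [loopA, if_neg hlt, if_pos hcond, loopB, if_pos (by omega),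
      Int.add_comm s e, if_pos (by rw [← hc]; exact hcond), ih]
  | case3 s e hlt mid hcond ih =>
    rw [loopA, if_neg hlt, if_neg hcond, loopB, if_pos (by omega),
      Int.add_comm s e, if_neg (by rw [← hc]; exact hcond), ih]

-- ===== VERDICT (by name: the statement is the Claim_ definition above) =====
theorem solution_spec : Claim_equal_solution := by
  intro diffs times limit _ hpre
  unfold Spec_solution solution solution_alt
  exact loop_agree diffs times _ _ _ limit
    (fun level => by
      rw [cost_agree diffs times level hpre]) 1 1000000000000000
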